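-- pv_equiv track=rewrite | github.com/slub/RAG-Tests | get_notes_from_obsidian_vault.py | has_tag
-- ===== SOURCE A (Python) =====
-- def has_tag(frontmatter, target_tag):
--     in_tags = False
--     for line in frontmatter:
--         stripped = line.strip()
--
--         if stripped.startswith("tags:"):
--             in_tags = True
--             continue
--
--         if in_tags:
--             if stripped.startswith("-"):
--                 tag = stripped.lstrip("-").strip()
--                 if tag == target_tag:
--                     return True
--             else:
--                 if stripped and not stripped.startswith("-"):
--                     in_tags = False
--     return False
-- ===== SOURCE B (Python) =====
-- def has_tag(frontmatter, target_tag):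
--     # Header-driven, block-at-a-time extraction (no boolean state machine):
--     # for each 'tags:' header line, scan the lines after it and collect its
--     # block's tags; a subsequent header delegates to its own iteration.
--     stripped = [line.strip() for line in frontmatter]
--     tags = []
--     for i, s in enumerate(stripped):
--         if s.startswith("tags:"):
--             for t in stripped[i + 1:]:
--                 if t.startswith("tags:"):
--                     break  # the later header's own block scan takes over
--                 if t.startswith("-"):
--                     tags.append(t.lstrip("-").strip())
--                 elif t:
--                     break
--     return target_tag in tags
-- ===== Notes on version B (the rewrite author's own statement) =====
-- stated objective: alternative
-- what changed: B replaces A's single-pass boolean state machine with header-driven nested scans: it pre-strips all lines, then for each 'tags:' header line scans only the suffix after it to extract that block's tags (delegating to the next header on encountering one), and finally tests membership of the target tag.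
import Mathlib
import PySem

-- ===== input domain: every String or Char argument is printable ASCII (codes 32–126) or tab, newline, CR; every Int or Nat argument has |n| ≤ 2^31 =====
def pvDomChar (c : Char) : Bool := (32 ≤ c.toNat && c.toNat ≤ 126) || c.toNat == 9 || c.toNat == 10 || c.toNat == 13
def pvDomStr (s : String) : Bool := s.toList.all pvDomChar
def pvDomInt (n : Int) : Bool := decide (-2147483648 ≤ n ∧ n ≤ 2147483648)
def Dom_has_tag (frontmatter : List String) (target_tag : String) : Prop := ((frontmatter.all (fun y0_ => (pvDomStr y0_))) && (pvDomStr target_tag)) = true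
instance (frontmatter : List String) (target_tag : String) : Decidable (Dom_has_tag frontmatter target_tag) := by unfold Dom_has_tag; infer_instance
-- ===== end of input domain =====

-- B trades A's single-pass boolean state machine for header-driven nested block scans
-- plus a final membership test (alternative decomposition, same return value; both total).

-- ===== PORT A =====
-- 'stripped.lstrip("-").strip()': lstrip with the single char '-' is dropWhile (· == '-') (exact), then PySem strip
def pvTagOf (s : List Char) : List Char := PySem.Chars.strip (s.dropWhile (· == '-'))

-- the loop of A, with the in_tags flag as state and early return True on a match
def has_tag_loop : List String → Bool → String → Bool
  | [], _, _ => false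
  | line :: rest, inTags, t =>
    let stripped := PySem.Chars.strip line.toList
    if PySem.Chars.startswith stripped "tags:".toList then
      has_tag_loop rest true t
    else if inTags then
      if PySem.Chars.startswith stripped "-".toList then
        if pvTagOf stripped = t.toList then true
        else has_tag_loop rest inTags t
      else if stripped ≠ [] ∧ ¬ (PySem.Chars.startswith stripped "-".toList = true) then
        has_tag_loop rest false t
      else has_tag_loop rest inTags t
    else has_tag_loop rest inTags t

def has_tag (frontmatter : List String) (target_tag : String) : Bool :=
  has_tag_loop frontmatter false target_tag

-- ===== PORT B =====
-- Source B's inner loop: tags of one block, the lines after one 'tags:' header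
def pvBlock : List (List Char) → List (List Char)
  | [] => []
  | s :: rest =>
    if PySem.Chars.startswith s "tags:".toList then []
    else if PySem.Chars.startswith s "-".toList then pvTagOf s :: pvBlock rest
    else if s ≠ [] then []
    else pvBlock rest

-- Source B's outer loop: for each header line, scan the suffix after it
def pvBlocks : List (List Char) → List (List Char)
  | [] => []
  | s :: rest =>
    (if PySem.Chars.startswith s "tags:".toList then pvBlock rest else []) ++ pvBlocks rest

def has_tag_alt (frontmatter : List String) (target_tag : String) : Bool :=
  (pvBlocks (frontmatter.map (fun line => PySem.Chars.strip line.toList))).contains target_tag.toList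

-- ===== PRECONDITION & SPEC =====
def Spec_has_tag (frontmatter : List String) (target_tag : String) (out : Bool) : Prop := out = has_tag_alt frontmatter target_tag
instance (frontmatter : List String) (target_tag : String) (out : Bool) : Decidable (Spec_has_tag frontmatter target_tag out) := by unfold Spec_has_tag; infer_instance

-- ===== CLAIM (what is proved, stated in full; the proofs are below) =====
def Claim_equal_has_tag : Prop := ∀ (frontmatter : List String) (target_tag : String), Dom_has_tag frontmatter target_tag → Spec_has_tag frontmatter target_tag (has_tag frontmatter target_tag)

-- ===== LEMMAS AND PROOFS =====

-- reference: the list of tags A's state machine passes its comparison over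
def collectRec : List String → Bool → List (List Char)
  | [], _ => []
  | line :: rest, b =>
    let stripped := PySem.Chars.strip line.toList
    if PySem.Chars.startswith stripped "tags:".toList then collectRec rest true
    else if b then
      if PySem.Chars.startswith stripped "-".toList then pvTagOf stripped :: collectRec rest b
      else if stripped ≠ [] then collectRec rest false
      else collectRec rest b
    else collectRec rest b

-- A's early-return loop is the membership test over collectRec
theorem loop_eq_mem (ls : List String) (b : Bool) (t : String) :
    has_tag_loop ls b t = (collectRec ls b).contains t.toList := by
  induction ls generalizing b with
  | nil => simp [has_tag_loop, collectRec]
  | cons line rest ih =>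
    rw [has_tag_loop, collectRec]
    by_cases h1 : PySem.Chars.startswith (PySem.Chars.strip line.toList) "tags:".toList = true
    · rw [if_pos h1, if_pos h1]; exact ih true
    · rw [if_neg h1, if_neg h1]
      cases b with
      | false =>
        rw [if_neg Bool.false_ne_true, if_neg Bool.false_ne_true]; exact ih false
      | true =>
        rw [if_pos rfl, if_pos rfl]
        by_cases h3 : PySem.Chars.startswith (PySem.Chars.strip line.toList) "-".toList = true
        · rw [if_pos h3, if_pos h3]
          by_cases h4 : pvTagOf (PySem.Chars.strip line.toList) = t.toList
          · rw [if_pos h4]; simp [h4]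
          · have h4' : ¬ (t.toList == pvTagOf (PySem.Chars.strip line.toList)) = true := by
              simp; exact fun h => h4 h.symm
            rw [if_neg h4]
            simp only [List.contains_cons, h4', Bool.false_or]
            exact ih true
        · rw [if_neg h3, if_neg h3]
          -- A's extra conjunct repeats ¬h3, so the compound test amounts to stripped ≠ []
          by_cases hne : PySem.Chars.strip line.toList ≠ []
          · rw [if_pos ⟨hne, h3⟩, if_pos hne]; exact ih false
          · rw [if_neg (fun h => hne h.1), if_neg hne]; exact ih true

-- collectRec is exactly B's blocks (prefixed by the current block when the flag is set)
theorem collectRec_eq_blocks (ls : List String) (b : Bool) :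
    collectRec ls b =
      (if b then pvBlock (ls.map (fun line => PySem.Chars.strip line.toList)) else [])
        ++ pvBlocks (ls.map (fun line => PySem.Chars.strip line.toList)) := by
  induction ls generalizing b with
  | nil => cases b <;> simp [collectRec, pvBlock, pvBlocks]
  | cons line rest ih =>
    rw [collectRec, List.map_cons, pvBlocks, pvBlock]
    by_cases h1 : PySem.Chars.startswith (PySem.Chars.strip line.toList) "tags:".toList = true
    · rw [if_pos h1, if_pos h1, ih true, if_pos rfl, if_pos h1]
      cases b <;> simp
    · rw [if_neg h1, if_neg h1]
      cases b with
      | false => rw [if_neg Bool.false_ne_true, if_neg Bool.false_ne_true, ih false, if_neg h1]; simp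
      | true =>
        rw [if_pos rfl, if_pos rfl]
        by_cases h3 : PySem.Chars.startswith (PySem.Chars.strip line.toList) "-".toList = true
        · rw [if_pos h3, if_pos h3, ih true, if_pos rfl, if_neg h1]; simp
        · rw [if_neg h3, if_neg h3]
          by_cases hne : PySem.Chars.strip line.toList ≠ []
          · rw [if_pos hne, if_pos hne, ih false, if_neg h1]; simp
          · rw [if_neg hne, if_neg hne, ih true, if_pos rfl, if_neg h1, List.nil_append]

-- ===== VERDICT (by name: the statement is the Claim_ definition above) =====
theorem has_tag_spec : Claim_equal_has_tag := by
  intro fm t _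
  unfold Spec_has_tag has_tag has_tag_alt
  rw [loop_eq_mem, collectRec_eq_blocks fm false, if_neg Bool.false_ne_true, List.nil_append]
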